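-- pv_equiv track=rewrite | github.com/zcx01/Achievement | pythonscript/topic_def.py | get_upper_case_name
-- ===== SOURCE A (Python) =====
-- def get_upper_case_name(text):
--     lst = []
--     last_char = ''
--     for index, char in enumerate(text):
--         if char.isupper() and index != 0 and last_char.islower():
--             lst.append("_")
--         lst.append(char)
--         last_char = char
--     result = "".join(lst).upper()
--     return result
-- ===== SOURCE B (Python) =====
-- def get_upper_case_name(text):
--     boundaries = [i for i in range(1, len(text))
--                   if text[i].isupper() and text[i - 1].islower()]
--     segments = []
--     prev = 0
--     for b in boundaries:
--         segments.append(text[prev:b])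
--         prev = b
--     segments.append(text[prev:])
--     return "_".join(segments).upper()
-- ===== Notes on version B (the rewrite author's own statement) =====
-- stated objective: alternative
-- what changed: Replaced the per-character append-with-carry loop by a two-phase algorithm: first collect the boundary indices (uppercase preceded by lowercase), then rebuild the string by slicing at those indices and underscore-joining the segments before uppercasing.
import Mathlib
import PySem

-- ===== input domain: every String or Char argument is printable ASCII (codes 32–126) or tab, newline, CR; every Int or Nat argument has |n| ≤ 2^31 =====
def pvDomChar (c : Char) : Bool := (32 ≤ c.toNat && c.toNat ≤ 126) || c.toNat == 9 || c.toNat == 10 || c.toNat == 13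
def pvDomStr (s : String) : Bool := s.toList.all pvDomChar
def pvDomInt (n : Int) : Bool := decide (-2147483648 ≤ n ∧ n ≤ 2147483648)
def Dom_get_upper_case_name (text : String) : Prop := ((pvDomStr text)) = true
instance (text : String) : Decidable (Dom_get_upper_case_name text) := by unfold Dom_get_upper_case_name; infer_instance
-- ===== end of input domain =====

-- B rebuilds the string in two phases (boundary indices, then slice-and-join) instead of A's
-- per-character append loop; same return value, no speed claim.

-- ===== PORT A =====
-- Python's last_char starts as '' (islower() = False) and is afterwards a one-char string:
-- ported as Option Char, none for '' and Chars.islower for the single ASCII char (exact on Dom).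
def get_upper_case_name (text : String) : String :=
  let st := (PySem.List.enumerate text.toList 0).foldl
    (fun (acc : List Char × Option Char) (ic : Int × Char) =>
      let lst := if PySem.Chars.isupper ic.2 && decide (ic.1 ≠ 0) &&
                    (match acc.2 with
                     | some c => PySem.Chars.islower c
                     | none => false)
                 then acc.1 ++ ['_'] else acc.1
      (lst ++ [ic.2], some ic.2))
    ([], none)
  String.ofList (PySem.Chars.upper st.1)

-- ===== PORT B =====
-- text[i] / text[i-1] with 1 ≤ i < len(text) are always in range; ported via pyGet? (none = IndexError
-- can never occur there, the match default false is dead code).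
def get_upper_case_name_alt (text : String) : String :=
  let cs := text.toList
  let boundaries := (PySem.List.pyRange 1 (PySem.Chars.len cs) 1).filter (fun i =>
      match PySem.List.pyGet? cs i, PySem.List.pyGet? cs (i - 1) with
      | some a, some b => PySem.Chars.isupper a && PySem.Chars.islower b
      | _, _ => false)
  let st := boundaries.foldl
    (fun (acc : List (List Char) × Int) (b : Int) =>
      (acc.1 ++ [PySem.List.slice cs (some acc.2) (some b)], b))
    ([], 0)
  let segments := st.1 ++ [PySem.List.slice cs (some st.2) none]
  String.ofList (PySem.Chars.upper (PySem.Chars.join ['_'] segments))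

-- ===== PRECONDITION & SPEC =====
def Spec_get_upper_case_name (text : String) (out : String) : Prop := out = get_upper_case_name_alt text
instance (text : String) (out : String) : Decidable (Spec_get_upper_case_name text out) := by unfold Spec_get_upper_case_name; infer_instance

-- ===== CLAIM (what is proved, stated in full; the proofs are below) =====
def Claim_equal_get_upper_case_name : Prop := ∀ (text : String), Dom_get_upper_case_name text → Spec_get_upper_case_name text (get_upper_case_name text)

-- ===== LEMMAS AND PROOFS =====

-- canonical result (before uppercasing): '_' inserted before an uppercase char preceded by a lowercase one
def pvGo (prev : Char) : List Char → List Char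
  | [] => []
  | c :: rest =>
      (if PySem.Chars.isupper c && PySem.Chars.islower prev then ['_', c] else [c]) ++ pvGo c rest

def pvIns : List Char → List Char
  | [] => []
  | c :: rest => c :: pvGo c rest

-- boundary test at Nat index i (meaningful for 1 ≤ i < cs.length)
def pvBnd (cs : List Char) (i : Nat) : Bool :=
  match cs[i]?, cs[i - 1]? with
  | some a, some b => PySem.Chars.isupper a && PySem.Chars.islower b
  | _, _ => false

-- B's segment list, in Nat world
def pvSegs (cs : List Char) : Nat → List Nat → List (List Char)
  | _, [] => []
  | p, b :: bs => ((cs.drop p).take (b - p)) :: pvSegs cs b bs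

def pvLast : Nat → List Nat → Nat
  | p, [] => p
  | _, b :: bs => pvLast b bs

-- ---- A side ----

lemma pvA_fold (l : List Char) (s : Int) (hs : 1 ≤ s) (prev : Char) (acc : List Char) :
    ((PySem.List.enumerate l s).foldl
      (fun (acc : List Char × Option Char) (ic : Int × Char) =>
        ((if PySem.Chars.isupper ic.2 && decide (ic.1 ≠ 0) &&
              (match acc.2 with
               | some c => PySem.Chars.islower c
               | none => false)
           then acc.1 ++ ['_'] else acc.1) ++ [ic.2], some ic.2))
      (acc, some prev)).1 = acc ++ pvGo prev l := by
  induction l generalizing s prev acc with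
  | nil => simp [PySem.List.enumerate_nil, pvGo]
  | cons c rest ih =>
      rw [PySem.List.enumerate_cons, List.foldl_cons]
      have hne : (decide (s ≠ 0)) = true := by simp; omega
      simp only [hne, Bool.and_true]
      rw [ih (s + 1) (by omega)]
      simp only [pvGo]
      by_cases h : PySem.Chars.isupper c && PySem.Chars.islower prev
      · simp [h]
      · simp [h]

lemma pvA_list (cs : List Char) : get_upper_case_name (String.ofList cs)
    = String.ofList (PySem.Chars.upper (pvIns cs)) := by
  unfold get_upper_case_name
  rw [String.toList_ofList]
  cases cs with
  | nil => simp [PySem.List.enumerate_nil, pvIns]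
  | cons c rest =>
      rw [PySem.List.enumerate_cons, List.foldl_cons]
      have h0 : (decide ((0 : Int) ≠ 0)) = false := by decide
      simp only [h0, Bool.and_false, Bool.false_eq_true, if_false, List.nil_append, zero_add]
      rw [pvA_fold rest 1 (by omega)]
      simp [pvIns]

-- ---- B side ----

lemma pv_join_cons (x : List Char) (ys : List (List Char)) (h : ys ≠ []) :
    PySem.Chars.join ['_'] (x :: ys) = x ++ '_' :: PySem.Chars.join ['_'] ys := by
  cases ys with
  | nil => exact absurd rfl h
  | cons y ys' => simp [PySem.Chars.join_cons_cons]

lemma pvSegs_ne_nil (cs : List Char) (p : Nat) (bs : List Nat) :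
    pvSegs cs p bs ++ [cs.drop (pvLast p bs)] ≠ [] := by
  cases bs <;> simp [pvSegs, pvLast]

-- the boundary list computed by B equals the Nat-world boundary list, cast to Int
lemma pvB_boundaries (cs : List Char) :
    (PySem.List.pyRange 1 (PySem.Chars.len cs) 1).filter (fun i =>
      match PySem.List.pyGet? cs i, PySem.List.pyGet? cs (i - 1) with
      | some a, some b => PySem.Chars.isupper a && PySem.Chars.islower b
      | _, _ => false)
    = ((List.range' 1 (cs.length - 1)).filter (pvBnd cs)).map (fun k : Nat => (k : Int)) := by
  rw [PySem.Chars.len_eq, PySem.List.pyRange_one]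
  have hlen : ((cs.length : Int) - 1).toNat = cs.length - 1 := by omega
  rw [hlen, List.filter_map, List.range'_eq_map_range, List.filter_map, List.map_map]
  congr 1
  · apply List.filter_congr
    intro k _
    have h1 : (1 : Int) + (k : Int) = ((k + 1 : Nat) : Int) := by push_cast; ring
    simp only [Function.comp, h1, PySem.List.pyGet?_natCast]
    have h2 : ((k + 1 : Nat) : Int) - 1 = ((k : Nat) : Int) := by push_cast; ring
    rw [h2, PySem.List.pyGet?_natCast]
    simp [pvBnd, Nat.add_comm 1 k]

-- B's foldl over the cast boundary list, reduced to Nat world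
lemma pvB_fold (cs : List Char) (bs : List Nat) (p : Nat) (acc : List (List Char)) :
    (bs.map (fun k : Nat => (k : Int))).foldl
      (fun (acc : List (List Char) × Int) (b : Int) =>
        (acc.1 ++ [PySem.List.slice cs (some acc.2) (some b)], b))
      (acc, (p : Int))
    = (acc ++ pvSegs cs p bs, ((pvLast p bs : Nat) : Int)) := by
  induction bs generalizing p acc with
  | nil => simp [pvSegs, pvLast]
  | cons b bs' ih =>
      simp only [List.map_cons, List.foldl_cons]
      rw [PySem.List.slice_natCast, ih b]
      simp [pvSegs, pvLast]

-- main combinatorial lemma: joining the segments cut at the boundary indices ≥ k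
-- reconstructs the canonical insertion on the suffix from k
lemma pvB_main (cs : List Char) (m k p : Nat) (hm : m = cs.length - k) (hp : p ≤ k)
    (hk1 : 1 ≤ k) (hkn : k ≤ cs.length) :
    PySem.Chars.join ['_']
      (pvSegs cs p ((List.range' k (cs.length - k)).filter (pvBnd cs))
        ++ [cs.drop (pvLast p ((List.range' k (cs.length - k)).filter (pvBnd cs)))])
    = (cs.drop p).take (k - p) ++ pvGo (cs[k - 1]'(by omega)) (cs.drop k) := by
  induction m generalizing k p with
  | zero =>
      have hk : k = cs.length := by omega
      subst hk
      simp only [Nat.sub_self, List.range'_zero, List.filter_nil, pvSegs, pvLast,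
        List.nil_append, PySem.Chars.join_singleton, List.drop_length, pvGo, List.append_nil]
      rw [List.take_of_length_le (by simp)]
  | succ m ih =>
      have hklt : k < cs.length := by omega
      have hrange : cs.length - k = (cs.length - (k + 1)) + 1 := by omega
      rw [hrange, List.range'_succ]
      have hdrop : cs.drop k = cs[k]'hklt :: cs.drop (k + 1) :=
        List.drop_eq_getElem_cons hklt
      have hbnd : pvBnd cs k = (PySem.Chars.isupper (cs[k]'hklt)
          && PySem.Chars.islower (cs[k-1]'(by omega))) := by
        simp [pvBnd, hklt, (by omega : k - 1 < cs.length)]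
      have hgo : pvGo (cs[k - 1]'(by omega)) (cs.drop k)
          = (if pvBnd cs k then ['_', cs[k]'hklt] else [cs[k]'hklt])
            ++ pvGo (cs[k]'hklt) (cs.drop (k + 1)) := by
        rw [hdrop]; simp [pvGo, hbnd]
      have hidx : cs[(k+1) - 1]'(by omega) = cs[k]'hklt := by congr 1
      by_cases hb : pvBnd cs k
      · rw [List.filter_cons_of_pos hb]
        simp only [pvSegs, pvLast, List.cons_append]
        rw [pv_join_cons _ _ (pvSegs_ne_nil cs k _)]
        rw [ih (k + 1) k (by omega) (by omega) (by omega) (by omega)]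
        rw [hgo, hidx]
        simp only [hb, if_true]
        have htake1 : (cs.drop k).take ((k+1) - k) = [cs[k]'hklt] := by
          rw [show k + 1 - k = 0 + 1 from by omega, hdrop, List.take_succ_cons,
            List.take_zero]
        rw [htake1]
        simp
      · rw [List.filter_cons_of_neg hb]
        rw [ih (k + 1) p (by omega) (by omega) (by omega) (by omega)]
        rw [hgo, hidx]
        simp only [hb, if_false, Bool.false_eq_true]
        have htake : (cs.drop p).take ((k + 1) - p)
            = (cs.drop p).take (k - p) ++ [cs[k]'hklt] := by
          have hsucc : (k + 1) - p = (k - p) + 1 := by omega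
          rw [hsucc, List.take_add_one]
          have hlt : k - p < (cs.drop p).length := by simp; omega
          rw [List.getElem?_eq_getElem hlt]
          congr 1
          simp [List.getElem_drop]
          congr 1
          omega
        rw [htake]
        simp

lemma pvB_list (cs : List Char) : get_upper_case_name_alt (String.ofList cs)
    = String.ofList (PySem.Chars.upper (pvIns cs)) := by
  unfold get_upper_case_name_alt
  simp only [String.toList_ofList]
  rw [pvB_boundaries]
  cases cs with
  | nil => simp [pvIns, PySem.Chars.join_singleton, PySem.List.slice_none_none]
  | cons c rest =>
      rw [show ((0 : Int)) = ((0 : Nat) : Int) by norm_num, pvB_fold]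
      rw [PySem.List.slice_from_natCast]
      have := pvB_main (c :: rest) ((c :: rest).length - 1) 1 0 rfl (by omega) (by omega)
        (by simp)
      simp only [List.drop_zero, Nat.sub_zero] at this
      simp only [List.nil_append]
      rw [this]
      simp [pvIns]

-- ===== VERDICT (by name: the statement is the Claim_ definition above) =====
theorem get_upper_case_name_spec : Claim_equal_get_upper_case_name := by
  intro text _
  unfold Spec_get_upper_case_name
  have h1 := pvA_list text.toList
  have h2 := pvB_list text.toList
  rw [String.ofList_toList] at h1 h2
  rw [h1, h2]
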